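-- pv_equiv track=rewrite | github.com/jandolezal/advent-of-code-2021 | day_10/syntax_scoring.py | find_illegal_closing
-- ===== SOURCE A (Python) =====
-- def find_illegal_closing(line):
--     map = {
--         ')': '(',
--         ']': '[',
--         '}': '{',
--         '>': '<',
--     }
--     closing_indexes = []
--
--     closing_indexes = [line.find(c) for c in map if line.find(c) != -1 ]
--
--     try:
--         first_index = min(closing_indexes)
--     except ValueError: # closing_indexes is empty
--         return None
--
--     first_char = line[first_index]
--     # Check if character preceding first closing character is a match
--     if line[first_index-1] != map[first_char]:
--         return first_char
-- ===== SOURCE B (Python) =====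
-- BRACKETS = {')': '(', ']': '[', '}': '{', '>': '<'}
--
--
-- def find_illegal_closing(line):
--     for i, ch in enumerate(line):
--         expected = BRACKETS.get(ch)
--         if expected is not None:
--             return ch if line[i - 1] != expected else None
--     return None
-- ===== Notes on version B (the rewrite author's own statement) =====
-- stated objective: simpler
-- what changed: One linear pass over enumerate(line) stops at the earliest closing bracket and checks its predecessor, replacing A's four full line.find scans, a filtered list build and min().
import Mathlib
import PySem

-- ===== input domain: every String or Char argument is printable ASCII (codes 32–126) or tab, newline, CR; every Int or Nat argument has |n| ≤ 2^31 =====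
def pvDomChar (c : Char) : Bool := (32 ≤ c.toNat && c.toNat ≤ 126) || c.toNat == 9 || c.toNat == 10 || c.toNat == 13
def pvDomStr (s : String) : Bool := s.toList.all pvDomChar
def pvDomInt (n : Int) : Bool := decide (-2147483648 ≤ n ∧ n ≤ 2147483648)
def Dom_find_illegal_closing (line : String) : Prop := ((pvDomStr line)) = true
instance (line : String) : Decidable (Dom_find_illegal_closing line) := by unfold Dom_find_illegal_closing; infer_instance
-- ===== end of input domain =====

-- B replaces A's four full line.find scans plus a filtered min() with a single pass over
-- enumerate(line) that stops at the earliest closing bracket (objective: simpler).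

-- ===== PORT A =====
def find_illegal_closing (line : String) : Option String :=
  let map : PySem.Dict Char Char :=
    (((PySem.Dict.empty.insert ')' '(').insert ']' '[').insert '}' '{').insert '>' '<'
  let closing_indexes : List Int :=
    (map.keys.filter (fun c => PySem.Str.find line (String.ofList [c]) != -1)).map
      (fun c => PySem.Str.find line (String.ofList [c]))
  match PySem.List.min? closing_indexes (fun x => x) with
  | none => none                 -- ValueError on min([]): return None
  | some first_index =>
    match PySem.Str.pyGet? line first_index with
    | none => none               -- IndexError: unreachable, a successful find is a valid index
    | some first_char =>
      if PySem.Str.pyGet? line (first_index - 1) ≠ map.get? first_char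
      then some (String.ofList [first_char]) else none

-- ===== PORT B =====
-- B-side helper: the module-level BRACKETS dict of Source B
def pvBrackets : PySem.Dict Char Char :=
  (((PySem.Dict.empty.insert ')' '(').insert ']' '[').insert '}' '{').insert '>' '<'

-- B-side helper: Source B's for-loop over enumerate(line)
def pvAltLoop (line : String) : List (Int × Char) → Option String
  | [] => none
  | (i, ch) :: rest =>
    match pvBrackets.get? ch with
    | some expected =>
      if PySem.Str.pyGet? line (i - 1) ≠ some expected then some (String.ofList [ch]) else none
    | none => pvAltLoop line rest

def find_illegal_closing_alt (line : String) : Option String :=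
  pvAltLoop line (PySem.List.enumerate line.toList 0)

-- ===== PRECONDITION & SPEC =====
def Spec_find_illegal_closing (line : String) (out : Option String) : Prop := out = find_illegal_closing_alt line
instance (line : String) (out : Option String) : Decidable (Spec_find_illegal_closing line out) := by unfold Spec_find_illegal_closing; infer_instance

-- ===== CLAIM (what is proved, stated in full; the proofs are below) =====
def Claim_equal_find_illegal_closing : Prop := ∀ (line : String), Dom_find_illegal_closing line → Spec_find_illegal_closing line (find_illegal_closing line)

-- ===== LEMMAS AND PROOFS =====

-- the closing-bracket test Source B's loop performs
def pvIsClosing (ch : Char) : Bool := (pvBrackets.get? ch).isSome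

-- the check both programs perform at the first closing bracket (index i, character ch)
def pvCheck (line : String) (i : Int) (ch : Char) : Option String :=
  if PySem.Str.pyGet? line (i - 1) ≠ pvBrackets.get? ch then some (String.ofList [ch]) else none

theorem pvBrackets_get? (ch : Char) : pvBrackets.get? ch =
    if ch = ')' then some '(' else if ch = ']' then some '[' else
    if ch = '}' then some '{' else if ch = '>' then some '<' else none := by
  have h : pvBrackets = PySem.Dict.mk [(')','('),(']','['),('}','{'),('>','<')] := rfl
  rw [h]
  simp only [PySem.Dict.get?_mk_cons, beq_iff_eq]
  split_ifs with h1 h2 h3 h4 h5 h6 h7 h8 <;> first | rfl | simp_all [eq_comm]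

theorem pvIsClosing_iff (ch : Char) : pvIsClosing ch = true ↔ ch ∈ [')', ']', '}', '>'] := by
  simp only [pvIsClosing, pvBrackets_get?, List.mem_cons]
  split_ifs <;> simp_all

theorem pvFind_eq_neg_one (l : List Char) (c : Char) :
    PySem.Chars.find l [c] = -1 ↔ c ∉ l := by
  rw [PySem.Chars.find_eq_neg_one_iff, List.singleton_infix_iff]

theorem pvFind_spec (l : List Char) (c : Char) (h : PySem.Chars.find l [c] ≠ -1) :
    ∃ f : Nat, PySem.Chars.find l [c] = (f : Int) ∧ l[f]? = some c ∧
      ∀ i < f, l[i]? ≠ some c := by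
  have h0 : 0 ≤ PySem.Chars.find l [c] := by
    have := PySem.Chars.neg_one_le_find l [c]; omega
  obtain ⟨hpre, hmin⟩ := PySem.Chars.find_spec h0
  refine ⟨(PySem.Chars.find l [c]).toNat, by omega, ?_, ?_⟩
  · obtain ⟨t, ht⟩ := hpre
    have hd : l.drop (PySem.Chars.find l [c]).toNat = c :: t := ht.symm
    have h2 := List.getElem?_drop (xs := l) (i := (PySem.Chars.find l [c]).toNat) (j := 0)
    simp only [Nat.add_zero] at h2
    rw [← h2, hd]
    rfl
  · intro i hi hcontra
    apply hmin i hi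
    refine ⟨(l.drop (i+1)), ?_⟩
    have hlt : i < l.length := by
      by_contra hge
      simp [List.getElem?_eq_none (by omega : l.length ≤ i)] at hcontra
    rw [List.getElem?_eq_getElem hlt] at hcontra
    have := List.getElem_cons_drop (as := l) (i := i) hlt
    simp_all

theorem pvFindIdx?_some (p : Char → Bool) (l : List Char) (j : Nat)
    (h : List.findIdx? p l = some j) :
    ∃ hj : j < l.length, p l[j] = true ∧ ∀ i (hi : i < j), p (l[i]'(by
      rw [List.findIdx?_eq_some_iff_findIdx_eq] at h; omega)) = false := by
  rw [List.findIdx?_eq_some_iff_findIdx_eq] at h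
  obtain ⟨hlen, hidx⟩ := h
  refine ⟨hlen, ?_, ?_⟩
  · subst hidx; exact List.findIdx_getElem
  · intro i hi; exact List.not_of_lt_findIdx (by omega)

theorem pvAltLoop_eq (line : String) (t : List Char) : ∀ s : Int,
    pvAltLoop line (PySem.List.enumerate t s) =
      match List.findIdx? pvIsClosing t with
      | none => none
      | some k => pvCheck line (s + k) (t.getD k ' ') := by
  induction t with
  | nil => intro s; simp [PySem.List.enumerate_nil, pvAltLoop]
  | cons c t ih =>
    intro s
    rw [PySem.List.enumerate_cons, List.findIdx?_cons]
    show (match pvBrackets.get? c with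
      | some expected =>
        if PySem.Str.pyGet? line (s - 1) ≠ some expected then some (String.ofList [c]) else none
      | none => pvAltLoop line (PySem.List.enumerate t (s+1))) = _
    by_cases hc : pvIsClosing c = true
    · obtain ⟨e, he⟩ := Option.isSome_iff_exists.mp hc
      rw [he]
      simp only [pvIsClosing, he, Option.isSome_some, if_pos]
      simp [pvCheck, he]
    · have hget : pvBrackets.get? c = none := by
        simp only [pvIsClosing] at hc
        exact Option.not_isSome_iff_eq_none.mp (by simpa using hc)
      rw [hget, ih (s+1)]
      simp only [hc]
      cases hk : List.findIdx? pvIsClosing t with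
      | none => rfl
      | some k =>
        simp only [Option.map_some, Bool.false_eq_true, if_false]
        show pvCheck line (s + 1 + (k : Int)) (t.getD k ' ') =
          pvCheck line (s + (((k : Nat) + 1 : Nat) : Int)) (t.getD k ' ')
        congr 1
        push_cast; ring

theorem pvMinFinds (l : List Char) :
    PySem.List.min? (List.map (fun c => PySem.Chars.find l [c])
      (List.filter (fun c => PySem.Chars.find l [c] != -1) [')', ']', '}', '>'])) (fun x => x)
    = (List.findIdx? pvIsClosing l).map (fun j => (j : Int)) := by
  cases hj : List.findIdx? pvIsClosing l with
  | none =>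
    show _ = (none : Option Int)
    rw [PySem.List.min?_eq_none_iff, List.map_eq_nil_iff, List.filter_eq_nil_iff]
    intro c hc
    have hall := List.findIdx?_eq_none_iff.mp hj
    simp only [bne_iff_ne, ne_eq, Decidable.not_not]
    rw [pvFind_eq_neg_one]
    intro hmem
    have h1 := hall c hmem
    have h2 := (pvIsClosing_iff c).mpr hc
    rw [h1] at h2
    exact absurd h2 (by simp)
  | some j =>
    obtain ⟨hjlen, hpj, hmin⟩ := pvFindIdx?_some pvIsClosing l j hj
    have hbK : l[j] ∈ [')', ']', '}', '>'] := (pvIsClosing_iff _).mp hpj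
    have hbl : l[j] ∈ l := List.getElem_mem hjlen
    have hfb_ne : PySem.Chars.find l [l[j]] ≠ -1 := by
      rw [ne_eq, pvFind_eq_neg_one]; simpa
    have hge : ∀ c ∈ [')', ']', '}', '>'], PySem.Chars.find l [c] ≠ -1 →
        (j : Int) ≤ PySem.Chars.find l [c] := by
      intro c hcK hcne
      obtain ⟨f, hf, hfc, _⟩ := pvFind_spec l c hcne
      rw [hf]
      have hflen : f < l.length := by
        by_contra hge'
        rw [List.getElem?_eq_none (by omega : l.length ≤ f)] at hfc
        exact absurd hfc (by simp)
      have hfcc : l[f] = c := by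
        rw [List.getElem?_eq_getElem hflen] at hfc
        exact Option.some_injective _ hfc
      by_contra hlt
      have hfalse := hmin f (by omega)
      rw [hfcc] at hfalse
      have htrue := (pvIsClosing_iff c).mpr hcK
      rw [hfalse] at htrue
      exact absurd htrue (by simp)
    have hfb : PySem.Chars.find l [l[j]] = (j : Int) := by
      obtain ⟨f, hf, hfc, hfirst⟩ := pvFind_spec l l[j] hfb_ne
      have hgej := hge l[j] hbK hfb_ne
      rw [hf] at hgej ⊢
      have hle : f ≤ j := by
        by_contra hgt
        exact hfirst j (by omega) (List.getElem?_eq_getElem hjlen)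
      have : f = j := by omega
      rw [this]
    have hbfilter : l[j] ∈ List.filter (fun c => PySem.Chars.find l [c] != -1) [')', ']', '}', '>'] := by
      rw [List.mem_filter]
      exact ⟨hbK, by simpa using hfb_ne⟩
    have hbmap : PySem.Chars.find l [l[j]] ∈ List.map (fun c => PySem.Chars.find l [c])
        (List.filter (fun c => PySem.Chars.find l [c] != -1) [')', ']', '}', '>']) :=
      List.mem_map_of_mem hbfilter
    cases hm : PySem.List.min? (List.map (fun c => PySem.Chars.find l [c])
        (List.filter (fun c => PySem.Chars.find l [c] != -1) [')', ']', '}', '>'])) (fun x => x) with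
    | none =>
      rw [PySem.List.min?_eq_none_iff] at hm
      rw [hm] at hbmap
      exact absurd hbmap (by simp)
    | some m =>
      have hmemm := PySem.List.min?_mem hm
      obtain ⟨c, hcfil, hcm⟩ := List.mem_map.mp hmemm
      rw [List.mem_filter] at hcfil
      have hmge : (j : Int) ≤ m := by
        rw [← hcm]
        exact hge c hcfil.1 (by simpa using hcfil.2)
      have hmle := PySem.List.min?_isMin hm _ hbmap
      rw [hfb] at hmle
      have hmj : m = (j : Int) := le_antisymm hmle hmge
      show some m = some (j : Int)
      rw [hmj]

theorem pvMain (line : String) : find_illegal_closing line = find_illegal_closing_alt line := by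
  rw [find_illegal_closing, find_illegal_closing_alt, pvAltLoop_eq]
  have hk : ((((PySem.Dict.empty.insert ')' '(').insert ']' '[').insert '}' '{').insert '>' '<'
      : PySem.Dict Char Char).keys = [')', ']', '}', '>'] := rfl
  simp only [hk, PySem.Str.find_eq]
  have ht : ∀ c : Char, (String.ofList [c]).toList = [c] := fun _ => String.toList_ofList
  simp only [ht]
  rw [pvMinFinds]
  cases hj : List.findIdx? pvIsClosing line.toList with
  | none => rfl
  | some j =>
    obtain ⟨hjlen, hpj, -⟩ := pvFindIdx?_some pvIsClosing line.toList j hj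
    have hget : PySem.Str.pyGet? line (j : Int) = some (line.toList[j]) := by
      rw [PySem.Str.pyGet?_eq]
      show PySem.List.pyGet? line.toList (j : Int) = _
      rw [PySem.List.pyGet?_natCast, List.getElem?_eq_getElem hjlen]
    show (match PySem.Str.pyGet? line ((j : Nat) : Int) with
      | none => (none : Option String)
      | some first_char =>
        if PySem.Str.pyGet? line (((j : Nat) : Int) - 1) ≠ pvBrackets.get? first_char
        then some (String.ofList [first_char]) else none)
      = pvCheck line (0 + (j : Int)) (line.toList.getD j ' ')
    rw [hget]
    show (if PySem.Str.pyGet? line ((j : Int) - 1) ≠ pvBrackets.get? line.toList[j]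
      then some (String.ofList [line.toList[j]]) else none) = _
    rw [pvCheck, List.getD_eq_getElem _ _ hjlen]
    rw [Int.zero_add]

-- ===== VERDICT (by name: the statement is the Claim_ definition above) =====
theorem find_illegal_closing_spec : Claim_equal_find_illegal_closing := by
  intro line _
  unfold Spec_find_illegal_closing
  exact pvMain line
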